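-- pv_equiv track=rewrite | github.com/NBudge/cse210-01 | tic_tac_toe.py | set_board
-- ===== SOURCE A (Python) =====
-- def set_board(side):
--     value_dict = {}
--     rows = []
--     val = 1
--     for i in range(0, side):
--         row_list = []
--         for num in range(0, side):
--             row_list.append(num+val)
--             value_dict[num+val] = str(f"{num+val}")
--         rows.append(row_list)
--         val = val + side
--     return rows
-- ===== SOURCE B (Python) =====
-- def set_board(side):
--     if side <= 0:
--         return []
--     flat = list(range(1, side*side+1))
--     return [flat[i*side:(i+1)*side] for i in range(side)]
-- ===== Notes on version B (the rewrite author's own statement) =====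
-- stated objective: simpler
-- what changed: Builds the flat 1..side*side sequence once and reshapes it into rows by per-row slicing, instead of nested loops with a running val, and drops the unused value_dict with its per-cell string formatting.
import Mathlib
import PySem

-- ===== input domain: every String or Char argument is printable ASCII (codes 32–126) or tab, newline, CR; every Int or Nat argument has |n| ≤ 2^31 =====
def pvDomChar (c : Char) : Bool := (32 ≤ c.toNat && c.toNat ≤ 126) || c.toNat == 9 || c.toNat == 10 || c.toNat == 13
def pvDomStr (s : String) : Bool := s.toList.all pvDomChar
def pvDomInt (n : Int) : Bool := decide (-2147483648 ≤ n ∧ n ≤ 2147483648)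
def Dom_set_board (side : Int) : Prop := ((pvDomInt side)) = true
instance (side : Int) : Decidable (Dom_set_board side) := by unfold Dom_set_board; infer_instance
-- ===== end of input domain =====

-- B builds the flat sequence 1..side*side once and reshapes it into rows by slicing,
-- instead of A's nested loops with a running val (and A's unused value_dict is dropped); objective: simpler.


-- ===== PORT A =====
-- state: (value_dict, rows, val)
def set_board (side : Int) : List (List Int) :=
  let r :=
    (PySem.List.pyRange 0 side 1).foldl
      (fun (st : PySem.Dict Int String × List (List Int) × Int) _i =>
        let inner :=
          (PySem.List.pyRange 0 side 1).foldl
            (fun (p : List Int × PySem.Dict Int String) num =>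
              (p.1 ++ [num + st.2.2], p.2.insert (num + st.2.2) (PySem.Int.toStr (num + st.2.2))))
            ([], st.1)
        (inner.2, st.2.1 ++ [inner.1], st.2.2 + side))
      (PySem.Dict.empty, ([] : List (List Int)), (1 : Int))
  r.2.1

-- ===== PORT B =====
def set_board_alt (side : Int) : List (List Int) :=
  if side ≤ 0 then []
  else
    let flat := PySem.List.pyRange 1 (side * side + 1) 1
    (PySem.List.pyRange 0 side 1).map
      (fun i => PySem.List.slice flat (some (i * side)) (some ((i + 1) * side)))

-- ===== PRECONDITION & SPEC =====
def Spec_set_board (side : Int) (out : List (List Int)) : Prop := out = set_board_alt side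
instance (side : Int) (out : List (List Int)) : Decidable (Spec_set_board side out) := by unfold Spec_set_board; infer_instance

-- ===== CLAIM (what is proved, stated in full; the proofs are below) =====
def Claim_equal_set_board : Prop := ∀ (side : Int), Dom_set_board side → Spec_set_board side (set_board side)

-- ===== LEMMAS AND PROOFS =====

-- shape of A's rows: one row per outer iteration, val advancing by side
def pvBuildRows (side val : Int) : List Int → List (List Int)
  | [] => []
  | _ :: t => ((PySem.List.pyRange 0 side 1).map (fun num => num + val)) :: pvBuildRows side (val + side) t

theorem pv_innerA (val : Int) (L rl : List Int) (vd : PySem.Dict Int String) :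
    (L.foldl
      (fun (p : List Int × PySem.Dict Int String) num =>
        (p.1 ++ [num + val], p.2.insert (num + val) (PySem.Int.toStr (num + val))))
      (rl, vd)).1 = rl ++ L.map (fun num => num + val) := by
  induction L generalizing rl vd with
  | nil => simp
  | cons h t ih => simp [List.foldl_cons, ih]

theorem pv_outerA (side : Int) (L : List Int) (vd : PySem.Dict Int String)
    (rows : List (List Int)) (val : Int) :
    (L.foldl
      (fun (st : PySem.Dict Int String × List (List Int) × Int) _i =>
        let inner :=
          (PySem.List.pyRange 0 side 1).foldl
            (fun (p : List Int × PySem.Dict Int String) num =>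
              (p.1 ++ [num + st.2.2], p.2.insert (num + st.2.2) (PySem.Int.toStr (num + st.2.2))))
            ([], st.1)
        (inner.2, st.2.1 ++ [inner.1], st.2.2 + side))
      (vd, rows, val)).2.1 = rows ++ pvBuildRows side val L := by
  induction L generalizing vd rows val with
  | nil => simp [pvBuildRows]
  | cons h t ih =>
      simp only [List.foldl_cons, ih, pvBuildRows, pv_innerA val (PySem.List.pyRange 0 side 1) [] vd]
      simp [List.append_assoc]

theorem pv_build_eq (side : Int) (L : List Int) (val : Int) :
    pvBuildRows side val L =
      (List.range L.length).map
        (fun (j : Nat) => (PySem.List.pyRange 0 side 1).map (fun num => num + (val + (j : Int) * side))) := by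
  induction L generalizing val with
  | nil => simp [pvBuildRows]
  | cons h t ih =>
      simp only [pvBuildRows, List.length_cons, List.range_succ_eq_map, List.map_cons, List.map_map]
      refine List.cons_eq_cons.mpr ⟨?_, ?_⟩
      · apply List.map_congr_left; intro x _; push_cast; ring_nf
      · rw [ih (val + side)]
        apply List.map_congr_left; intro j _
        apply List.map_congr_left; intro x _
        push_cast; ring_nf

-- a slice of the flat range is the corresponding sub-range
theorem pv_slice_row (side i : Int) (h0 : 0 ≤ i) (h1 : i < side) :
    PySem.List.slice (PySem.List.pyRange 1 (side * side + 1) 1)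
        (some (i * side)) (some ((i + 1) * side)) =
      PySem.List.pyRange (1 + i * side) (1 + (i + 1) * side) 1 := by
  have hs : 0 < side := lt_of_le_of_lt h0 h1
  have hi0 : 0 ≤ i * side := mul_nonneg h0 (le_of_lt hs)
  have hi1 : 0 ≤ (i + 1) * side := mul_nonneg (by omega) (le_of_lt hs)
  have hle : (i + 1) * side ≤ side * side := by nlinarith
  have hle0 : i * side ≤ (i + 1) * side := by nlinarith
  rw [PySem.List.slice_toNat _ hi0 hi1]
  rw [PySem.List.pyRange_one_append 1 (1 + i * side) (side * side + 1) (by omega) (by omega)]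
  rw [PySem.List.pyRange_one_append (1 + i * side) (1 + (i + 1) * side) (side * side + 1)
      (by omega) (by omega)]
  rw [List.drop_left' (l₂ := PySem.List.pyRange (1 + i * side) (1 + (i + 1) * side) 1 ++
        PySem.List.pyRange (1 + (i + 1) * side) (side * side + 1) 1)
      (by rw [PySem.List.length_pyRange_one]; omega)]
  rw [List.take_left' (by rw [PySem.List.length_pyRange_one]; omega)]

theorem set_board_eq_normal (side : Int) :
    set_board side =
      (List.range side.toNat).map
        (fun (j : Nat) => (List.range side.toNat).map (fun (k : Nat) => 1 + (j : Int) * side + (k : Int))) := by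
  show (_ : PySem.Dict Int String × List (List Int) × Int).2.1 = _
  rw [pv_outerA, pv_build_eq]
  simp only [List.nil_append, Int.sub_zero, PySem.List.pyRange_one, List.map_map,
    List.length_map, List.length_range]
  apply List.map_congr_left; intro j _
  apply List.map_congr_left; intro k _
  simp only [Function.comp_apply]
  ring_nf

theorem set_board_alt_eq_normal (side : Int) :
    set_board_alt side =
      (List.range side.toNat).map
        (fun (j : Nat) => (List.range side.toNat).map (fun (k : Nat) => 1 + (j : Int) * side + (k : Int))) := by
  unfold set_board_alt
  by_cases hpos : side ≤ 0
  · simp [hpos, Int.toNat_of_nonpos hpos]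
  simp only [hpos, if_false]
  have hrow : ∀ i ∈ PySem.List.pyRange 0 side 1,
      PySem.List.slice (PySem.List.pyRange 1 (side * side + 1) 1)
          (some (i * side)) (some ((i + 1) * side)) =
        (List.range side.toNat).map (fun (k : Nat) => 1 + i * side + (k : Int)) := by
    intro i hi
    rw [PySem.List.mem_pyRange_one] at hi
    rw [pv_slice_row side i hi.1 hi.2, PySem.List.pyRange_one]
    have h2 : 1 + (i + 1) * side - (1 + i * side) = side := by ring
    rw [h2]
  rw [List.map_congr_left hrow]
  rw [PySem.List.pyRange_one]
  simp only [Int.sub_zero, List.map_map]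
  apply List.map_congr_left; intro j _
  simp only [Function.comp_apply]
  apply List.map_congr_left; intro k _
  ring_nf

-- ===== VERDICT (by name: the statement is the Claim_ definition above) =====
theorem set_board_spec : Claim_equal_set_board := by
  intro side _
  unfold Spec_set_board
  rw [set_board_eq_normal, set_board_alt_eq_normal]
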